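-- pv_equiv track=rewrite | github.com/JewelGliss/pantluci | gismu2024.py | VSimp
-- ===== SOURCE A (Python) =====
-- def VSimp(word):
-- 	word="="+word
-- 	oldWord=""
-- 	while not oldWord == word:
-- 		oldWord=word
-- 		for c in "ptcln":
-- 			word=word.replace("="+c,c+"=")
--
-- 	word=word.replace("=","a=")
--
-- 	oldWord=""
-- 	while not oldWord == word:
-- 		oldWord=word
-- 		for c in "aiu":
-- 			word=word.replace("="+c,"=")
-- 	return word.replace("=","")
-- ===== SOURCE B (Python) =====
-- import re
--
-- def VSimp(word):
--     return re.sub(r'^([ptcln]*)[aiu]*', r'\1a', word)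
-- ===== Notes on version B (the rewrite author's own statement) =====
-- stated objective: idiomatic
-- what changed: Replaces A's fixpoint loops of marker-shifting string.replace passes with a single anchored regex substitution that captures the leading 'ptcln' run, consumes the following 'aiu' run, and inserts one 'a'.
-- outside the precondition, e.g. on VSimp('='): A returns 'a', B returns 'a='; on VSimp('a=b'): A returns 'ab', B returns 'a=b'
import Mathlib
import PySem

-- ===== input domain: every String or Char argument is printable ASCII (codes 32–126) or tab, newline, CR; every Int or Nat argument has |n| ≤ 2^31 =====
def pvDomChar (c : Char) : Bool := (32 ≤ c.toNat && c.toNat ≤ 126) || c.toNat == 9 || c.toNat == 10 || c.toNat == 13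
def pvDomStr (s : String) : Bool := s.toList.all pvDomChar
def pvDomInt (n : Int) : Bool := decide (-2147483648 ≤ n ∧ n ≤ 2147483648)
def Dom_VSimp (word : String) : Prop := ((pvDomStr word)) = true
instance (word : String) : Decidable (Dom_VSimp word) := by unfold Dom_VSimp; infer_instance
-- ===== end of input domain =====

-- B replaces A's fixpoint loops of marker-shifting replace passes by one anchored
-- regex substitution (leading 'ptcln' run kept, following 'aiu' run replaced by 'a').

-- ===== PORT A =====
-- A is ported at the List Char level (PySem.Chars.replace = Python str.replace);
-- each 'while not oldWord == word' loop becomes a fuelled recursion: a changing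
-- iteration strictly advances the '=' marker(s), so fuel (len+3)^2 is never exhausted.
def pvShiftPass (w : List Char) : List Char :=
  ['p','t','c','l','n'].foldl (fun w c => PySem.Chars.replace w ['=', c] [c, '=']) w

def pvShiftLoop : Nat → List Char → List Char → List Char
  | 0, _, w => w
  | f+1, old, w => if old = w then w else pvShiftLoop f w (pvShiftPass w)

def pvStripPass (w : List Char) : List Char :=
  ['a','i','u'].foldl (fun w c => PySem.Chars.replace w ['=', c] ['=']) w

def pvStripLoop : Nat → List Char → List Char → List Char
  | 0, _, w => w
  | f+1, old, w => if old = w then w else pvStripLoop f w (pvStripPass w)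

def VSimp (word : String) : String :=
  let w0 := '=' :: word.toList            -- word = "=" + word
  let fuel := (w0.length + 2) * (w0.length + 2)
  let w1 := pvShiftLoop fuel [] w0        -- first while loop, oldWord = ""
  let w2 := PySem.Chars.replace w1 ['='] ['a', '=']   -- word.replace("=","a=")
  let w3 := pvStripLoop fuel [] w2        -- second while loop, oldWord = ""
  String.ofList (PySem.Chars.replace w3 ['='] [])     -- word.replace("=","")

-- ===== PORT B =====
-- Source B:  re.sub(r'^([ptcln]*)[aiu]*', r'\1a', word)  —  the anchored pattern keeps the
-- leading run of 'ptcln' (group 1), consumes the following run of 'aiu', inserts 'a'.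
def pvIsCons (c : Char) : Bool := c = 'p' || c = 't' || c = 'c' || c = 'l' || c = 'n'
def pvIsVow (c : Char) : Bool := c = 'a' || c = 'i' || c = 'u'

def VSimp_alt (word : String) : String :=
  let cs := word.toList
  String.ofList (cs.takeWhile pvIsCons ++ 'a' :: (cs.dropWhile pvIsCons).dropWhile pvIsVow)

-- ===== PRECONDITION & SPEC =====
-- Pre_ excludes words containing '=', A's internal sentinel character: on such inputs
-- A's value is an accident of the sentinel colliding with the data (e.g. A("a=b") = "ab").
def Pre_VSimp (word : String) : Prop := '=' ∉ word.toList
instance (word : String) : Decidable (Pre_VSimp word) := by unfold Pre_VSimp; infer_instance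

def pvWitness_VSimp : String := "plita"

def Spec_VSimp (word : String) (out : String) : Prop := out = VSimp_alt word
instance (word : String) (out : String) : Decidable (Spec_VSimp word out) := by unfold Spec_VSimp; infer_instance

-- ===== CLAIM (what is proved, stated in full; the proofs are below) =====
def Claim_equal_VSimp : Prop := ∀ (word : String), Dom_VSimp word → Pre_VSimp word → Spec_VSimp word (VSimp word)

-- ===== LEMMAS AND PROOFS =====

-- ---- facts about PySem.Chars.replace.go (left-to-right, non-overlapping scan) ----
theorem pvGo_nil (old new : List Char) (fuel : Nat) (acc : List Char) :
    PySem.Chars.replace.go old new fuel [] acc = acc.reverse := by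
  cases fuel <;> simp [PySem.Chars.replace.go]

theorem pvGo_skip (ch : Char) (o2 new : List Char) :
    ∀ (l1 : List Char) (m : Nat) (l2 acc : List Char), ch ∉ l1 →
    PySem.Chars.replace.go (ch :: o2) new (l1.length + m) (l1 ++ l2) acc
      = PySem.Chars.replace.go (ch :: o2) new m l2 (l1.reverse ++ acc) := by
  intro l1
  induction l1 with
  | nil => intro m l2 acc _; simp
  | cons a t ih =>
      intro m l2 acc h
      have ha : a ≠ ch := fun e => h (by simp [e])
      have hpre : (ch :: o2).isPrefixOf (a :: (t ++ l2)) = false := by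
        rw [Bool.eq_false_iff]
        intro hc
        rw [List.isPrefixOf_iff_prefix] at hc
        exact ha (List.cons_prefix_cons.mp hc).1.symm
      have step : PySem.Chars.replace.go (ch::o2) new (t.length + m + 1) (a :: (t++l2)) acc
          = PySem.Chars.replace.go (ch::o2) new (t.length + m) (t++l2) (a::acc) := by
        rw [PySem.Chars.replace.go.eq_def]; simp [hpre]
      have : (a :: t).length + m = t.length + m + 1 := by simp; omega
      rw [List.cons_append, this, step, ih m l2 (a :: acc) (fun hm => h (List.mem_cons_of_mem _ hm))]
      simp

theorem pvGo_match (old new l2 acc : List Char) (fuel : Nat) (h : old ≠ []) :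
    PySem.Chars.replace.go old new (fuel + 1) (old ++ l2) acc
      = PySem.Chars.replace.go old new fuel l2 (new.reverse ++ acc) := by
  obtain ⟨c, t, rfl⟩ := List.exists_cons_of_ne_nil h
  rw [PySem.Chars.replace.go.eq_def]
  have hpre : (c :: t).isPrefixOf (c :: t ++ l2) = true := by
    rw [List.isPrefixOf_iff_prefix]; exact List.prefix_append _ _
  simp [List.drop_left']

theorem pvGo_clean (ch : Char) (o2 new l1 : List Char) (m : Nat) (acc : List Char)
    (h : ch ∉ l1) :
    PySem.Chars.replace.go (ch :: o2) new (l1.length + m) l1 acc = acc.reverse ++ l1 := by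
  have hh := pvGo_skip ch o2 new l1 m [] acc h
  simp only [List.append_nil] at hh
  rw [hh, pvGo_nil]
  simp

theorem pvReplace_single (l1 l2 o2 new : List Char) (h1 : '=' ∉ l1) (h2 : '=' ∉ l2) :
    PySem.Chars.replace (l1 ++ '=' :: l2) ('=' :: o2) new
      = if o2 <+: l2 then l1 ++ new ++ l2.drop o2.length else l1 ++ '=' :: l2 := by
  have hlen : (l1 ++ '=' :: l2).length = l1.length + (l2.length + 1) := by simp
  rw [PySem.Chars.replace]
  simp only [List.isEmpty_cons, if_false, Bool.false_eq_true]
  rw [hlen, pvGo_skip '=' o2 new l1 (l2.length + 1) ('=' :: l2) [] h1]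
  simp only [List.append_nil]
  by_cases hp : o2 <+: l2
  · obtain ⟨l3, rfl⟩ := hp
    have h3 : '=' ∉ l3 := fun hm => h2 (List.mem_append_right _ hm)
    have e1 : ('=' :: (o2 ++ l3)) = ('=' :: o2) ++ l3 := by simp
    have e2 : (o2 ++ l3).length + 1 = (o2.length + l3.length) + 1 := by simp
    rw [e1, e2, pvGo_match ('=' :: o2) new l3 _ _ (by simp)]
    have e3 : o2.length + l3.length = l3.length + o2.length := Nat.add_comm _ _
    rw [e3, pvGo_clean '=' o2 new l3 o2.length _ h3]
    simp [List.prefix_append, List.drop_left']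
  · have hpre : ('=' :: o2).isPrefixOf ('=' :: l2) = false := by
      rw [Bool.eq_false_iff]
      intro hc
      rw [List.isPrefixOf_iff_prefix] at hc
      exact hp (List.cons_prefix_cons.mp hc).2
    have step : PySem.Chars.replace.go ('='::o2) new (l2.length + 1) ('=' :: l2) l1.reverse
        = PySem.Chars.replace.go ('='::o2) new l2.length l2 ('=' :: l1.reverse) := by
      rw [PySem.Chars.replace.go.eq_def]; simp [hpre]
    rw [step, show l2.length = l2.length + 0 from rfl,
        pvGo_clean '=' o2 new l2 0 _ h2]
    simp [hp]

theorem pvSingleton_prefix (c : Char) (l : List Char) : [c] <+: l ↔ l.head? = some c := by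
  cases l with
  | nil => simp
  | cons a t => simp [List.cons_prefix_cons, eq_comm]

-- the four replace shapes A performs (all on a word with exactly one '=')
theorem pvRep_shift (l1 l2 : List Char) (c : Char) (h1 : '=' ∉ l1) (h2 : '=' ∉ l2) :
    PySem.Chars.replace (l1 ++ '=' :: l2) ['=', c] [c, '=']
      = if l2.head? = some c then (l1 ++ [c]) ++ '=' :: l2.tail else l1 ++ '=' :: l2 := by
  rw [show (['=', c] : List Char) = '=' :: [c] from rfl, pvReplace_single l1 l2 [c] [c, '='] h1 h2]
  by_cases h : l2.head? = some c
  · cases l2 with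
    | nil => simp at h
    | cons a t =>
        simp only [List.head?_cons, Option.some.injEq] at h
        subst h
        simp
  · rw [if_neg (fun hp => h ((pvSingleton_prefix c l2).mp hp)), if_neg h]

theorem pvRep_ins (l1 l2 : List Char) (h1 : '=' ∉ l1) (h2 : '=' ∉ l2) :
    PySem.Chars.replace (l1 ++ '=' :: l2) ['='] ['a', '=']
      = (l1 ++ ['a']) ++ '=' :: l2 := by
  rw [show (['='] : List Char) = '=' :: [] from rfl, pvReplace_single l1 l2 [] ['a','='] h1 h2]
  simp

theorem pvRep_strip (l1 l2 : List Char) (c : Char) (h1 : '=' ∉ l1) (h2 : '=' ∉ l2) :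
    PySem.Chars.replace (l1 ++ '=' :: l2) ['=', c] ['=']
      = if l2.head? = some c then l1 ++ '=' :: l2.tail else l1 ++ '=' :: l2 := by
  rw [show (['=', c] : List Char) = '=' :: [c] from rfl, pvReplace_single l1 l2 [c] ['='] h1 h2]
  by_cases h : l2.head? = some c
  · cases l2 with
    | nil => simp at h
    | cons a t =>
        simp only [List.head?_cons, Option.some.injEq] at h
        subst h
        simp
  · rw [if_neg (fun hp => h ((pvSingleton_prefix c l2).mp hp)), if_neg h]

theorem pvRep_del (l1 l2 : List Char) (h1 : '=' ∉ l1) (h2 : '=' ∉ l2) :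
    PySem.Chars.replace (l1 ++ '=' :: l2) ['='] [] = l1 ++ l2 := by
  rw [show (['='] : List Char) = '=' :: [] from rfl, pvReplace_single l1 l2 [] [] h1 h2]
  simp

-- ---- abstract states of the two fixpoint loops ----
def pvState1 (cs : List Char) (n : Nat) : List Char := cs.take n ++ '=' :: cs.drop n
def pvRun (cs : List Char) : Nat := (cs.takeWhile pvIsCons).length
def pvState2 (l1 s : List Char) (m : Nat) : List Char := l1 ++ '=' :: s.drop m
def pvVrun (s : List Char) : Nat := (s.takeWhile pvIsVow).length
def pvNum (cs : List Char) : List Char → Nat → Nat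
  | [], n => n
  | c :: L, n => pvNum cs L (if (cs.drop n).head? = some c then n+1 else n)

theorem pvNum_le (cs : List Char) : ∀ (L : List Char) (n : Nat), n ≤ pvNum cs L n := by
  intro L
  induction L with
  | nil => intro n; simp [pvNum]
  | cons c L ih =>
      intro n
      rw [pvNum]
      by_cases hc : (cs.drop n).head? = some c
      · rw [if_pos hc]
        have := ih (n+1)
        omega
      · rw [if_neg hc]
        exact ih n

theorem pvNum_progress (cs : List Char) :
    ∀ (L : List Char) (n : Nat) (c0 : Char), (cs.drop n).head? = some c0 → c0 ∈ L →
    n < pvNum cs L n := by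
  intro L
  induction L with
  | nil => intro n c0 _ h; simp at h
  | cons c L ih =>
      intro n c0 hhead hmem
      by_cases hc : (cs.drop n).head? = some c
      · have h1 : pvNum cs (c :: L) n = pvNum cs L (n+1) := by rw [pvNum, if_pos hc]
        have := pvNum_le cs L (n+1)
        omega
      · have hc0 : c0 ≠ c := fun e => hc (e ▸ hhead)
        have hmem' : c0 ∈ L := by
          rcases List.mem_cons.mp hmem with h | h
          · exact absurd h hc0
          · exact h
        have h1 : pvNum cs (c :: L) n = pvNum cs L n := by rw [pvNum, if_neg hc]
        rw [h1]; exact ih n c0 hhead hmem'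

-- takeWhile / dropWhile bookkeeping
theorem pvTake_run (p : Char → Bool) (l : List Char) :
    l.take ((l.takeWhile p).length) = l.takeWhile p :=
  ((List.prefix_iff_eq_take.mp (List.takeWhile_prefix p))).symm

theorem pvDrop_run (p : Char → Bool) (l : List Char) :
    l.drop ((l.takeWhile p).length) = l.dropWhile p := by
  induction l with
  | nil => simp
  | cons a t ih =>
      by_cases hp : p a
      · simp [List.takeWhile_cons_of_pos hp, List.dropWhile_cons_of_pos hp, ih]
      · simp [List.takeWhile_cons_of_neg hp, List.dropWhile_cons_of_neg hp]

theorem pvHead_dropWhile (p : Char → Bool) :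
    ∀ (l : List Char) (c : Char), (l.dropWhile p).head? = some c → p c = false := by
  intro l
  induction l with
  | nil => intro c h; simp at h
  | cons a t ih =>
      intro c h
      by_cases hp : p a
      · rw [List.dropWhile_cons_of_pos hp] at h; exact ih c h
      · rw [List.dropWhile_cons_of_neg hp] at h
        simp only [List.head?_cons, Option.some.injEq] at h
        subst h; exact Bool.eq_false_iff.mpr hp

theorem pvTakeWhile_get (p : Char → Bool) :
    ∀ (l : List Char) (n : Nat), n < (l.takeWhile p).length →
    ∃ c, (l.drop n).head? = some c ∧ p c = true := by
  intro l
  induction l with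
  | nil => intro n h; simp at h
  | cons a t ih =>
      intro n h
      by_cases hp : p a
      · rw [List.takeWhile_cons_of_pos hp] at h
        cases n with
        | zero => exact ⟨a, by simp, hp⟩
        | succ n =>
            simp only [List.length_cons] at h
            have := ih n (by omega)
            simpa using this
      · rw [List.takeWhile_cons_of_neg hp] at h; simp at h

theorem pvMarker_pos (l2 : List Char) :
    ∀ (l1 : List Char), '=' ∉ l1 →
    ((l1 ++ '=' :: l2).takeWhile (fun c => c ≠ '=')).length = l1.length := by
  intro l1
  induction l1 with
  | nil => intro _; simp
  | cons a t ih =>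
      intro h
      have ha : a ≠ '=' := fun e => h (by simp [e])
      rw [List.cons_append, List.takeWhile_cons_of_pos (by simp [ha])]
      simp only [List.length_cons]
      rw [ih (fun hm => h (List.mem_cons_of_mem _ hm))]

theorem pvState1_inj (cs : List Char) (hcs : '=' ∉ cs) (n m : Nat)
    (hn : n ≤ cs.length) (hm : m ≤ cs.length) (h : pvState1 cs n = pvState1 cs m) : n = m := by
  have h1 := pvMarker_pos (cs.drop n) (cs.take n) (fun hx => hcs (List.mem_of_mem_take hx))
  have h2 := pvMarker_pos (cs.drop m) (cs.take m) (fun hx => hcs (List.mem_of_mem_take hx))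
  rw [pvState1] at h
  rw [pvState1] at h
  rw [h] at h1
  rw [h2] at h1
  simp [List.length_take] at h1
  omega

theorem pvRun_le (cs : List Char) : pvRun cs ≤ cs.length := by
  simpa [pvRun] using (List.takeWhile_sublist _).length_le

theorem pvVrun_le (s : List Char) : pvVrun s ≤ s.length := by
  simpa [pvVrun] using (List.takeWhile_sublist _).length_le

-- ---- phase 1: the marker-shifting pass and loop ----
theorem pvPass1_fold (cs : List Char) (hcs : '=' ∉ cs) :
    ∀ (L : List Char), (∀ c ∈ L, pvIsCons c = true) → ∀ (n : Nat), n ≤ pvRun cs →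
    L.foldl (fun w c => PySem.Chars.replace w ['=', c] [c, '=']) (pvState1 cs n)
      = pvState1 cs (pvNum cs L n) ∧ pvNum cs L n ≤ pvRun cs := by
  intro L
  induction L with
  | nil => intro _ n hn; exact ⟨by simp [pvNum], by simpa [pvNum] using hn⟩
  | cons c L ih =>
      intro hL n hn
      have h1 : '=' ∉ cs.take n := fun hx => hcs (List.mem_of_mem_take hx)
      have h2 : '=' ∉ cs.drop n := fun hx => hcs (List.mem_of_mem_drop hx)
      have hstep := pvRep_shift (cs.take n) (cs.drop n) c h1 h2
      by_cases hc : (cs.drop n).head? = some c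
      · -- the marker moves one step right
        have hlt : n < pvRun cs := by
          rcases lt_or_eq_of_le hn with h | h
          · exact h
          · exfalso
            have hdrop : cs.drop n = cs.dropWhile pvIsCons := by
              rw [h, pvRun, pvDrop_run]
            rw [hdrop] at hc
            have hfalse := pvHead_dropWhile pvIsCons cs c hc
            have htrue := hL c (by simp)
            simp [htrue] at hfalse
        have hstate : pvState1 cs n = cs.take n ++ '=' :: cs.drop n := rfl
        have hnext : PySem.Chars.replace (pvState1 cs n) ['=', c] [c, '=']
            = pvState1 cs (n+1) := by
          rw [hstate, hstep, if_pos hc, pvState1]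
          have hget : cs[n]? = some c := by rwa [← List.head?_drop]
          rw [List.take_add_one, hget]
          simp [List.tail_drop]
        have hnum : pvNum cs (c :: L) n = pvNum cs L (n+1) := by rw [pvNum, if_pos hc]
        have := ih (fun c hc => hL c (List.mem_cons_of_mem _ hc)) (n+1) (Nat.succ_le_of_lt hlt)
        constructor
        · rw [List.foldl_cons, hnext, hnum]; exact this.1
        · rw [hnum]; exact this.2
      · have hnext : PySem.Chars.replace (pvState1 cs n) ['=', c] [c, '=']
            = pvState1 cs n := by rw [pvState1, hstep, if_neg hc]
        have hnum : pvNum cs (c :: L) n = pvNum cs L n := by rw [pvNum, if_neg hc]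
        have := ih (fun c hc => hL c (List.mem_cons_of_mem _ hc)) n hn
        exact ⟨by rw [List.foldl_cons, hnext, hnum]; exact this.1, by rw [hnum]; exact this.2⟩

theorem pvConsList : ∀ c : Char, pvIsCons c = true ↔ c ∈ ['p','t','c','l','n'] := by
  intro c
  simp only [pvIsCons, Bool.or_eq_true, decide_eq_true_eq, List.mem_cons, List.not_mem_nil, or_false]
  tauto

theorem pvState1_ne_nil (cs : List Char) (n : Nat) : pvState1 cs n ≠ [] := by
  simp [pvState1]

theorem pvLoop1_reach (cs : List Char) (hcs : '=' ∉ cs) :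
    ∀ (f : Nat) (n : Nat) (old : List Char), n ≤ pvRun cs → pvRun cs - n + 2 ≤ f →
    old ≠ pvState1 cs n →
    pvShiftLoop f old (pvState1 cs n) = pvState1 cs (pvRun cs) := by
  intro f
  induction f with
  | zero => intro n old _ hf _; omega
  | succ f ih =>
      intro n old hn hf hold
      rw [pvShiftLoop, if_neg hold]
      have hpass := pvPass1_fold cs hcs ['p','t','c','l','n']
        (fun c hc => (pvConsList c).mpr hc) n hn
      have hps : pvShiftPass (pvState1 cs n) = pvState1 cs (pvNum cs ['p','t','c','l','n'] n) := by
        rw [pvShiftPass]; exact hpass.1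
      rw [hps]
      by_cases hcase : n = pvRun cs
      · have heq : pvNum cs ['p','t','c','l','n'] n = n := by
          have := pvNum_le cs ['p','t','c','l','n'] n
          omega
        rw [heq, ← hcase]
        cases f with
        | zero => omega
        | succ f2 => rw [pvShiftLoop, if_pos rfl, hcase]
      · have hlt : n < pvRun cs := lt_of_le_of_ne hn hcase
        obtain ⟨c0, hhead, hc0⟩ := pvTakeWhile_get pvIsCons cs n hlt
        have hprog : n < pvNum cs ['p','t','c','l','n'] n :=
          pvNum_progress cs _ n c0 hhead ((pvConsList c0).mp hc0)
        apply ih (pvNum cs ['p','t','c','l','n'] n) (pvState1 cs n) hpass.2 (by omega)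
        intro he
        have := pvState1_inj cs hcs n _ (le_trans hn (pvRun_le cs))
          (le_trans hpass.2 (pvRun_le cs)) he
        omega

-- ---- phase 2: the vowel-stripping pass and loop ----
theorem pvPass2_fold (l1 s : List Char) (h1 : '=' ∉ l1) (hs : '=' ∉ s) :
    ∀ (L : List Char), (∀ c ∈ L, pvIsVow c = true) → ∀ (m : Nat), m ≤ pvVrun s →
    L.foldl (fun w c => PySem.Chars.replace w ['=', c] ['=']) (pvState2 l1 s m)
      = pvState2 l1 s (pvNum s L m) ∧ pvNum s L m ≤ pvVrun s := by
  intro L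
  induction L with
  | nil => intro _ m hm; exact ⟨by simp [pvNum], by simpa [pvNum] using hm⟩
  | cons c L ih =>
      intro hL m hm
      have h2 : '=' ∉ s.drop m := fun hx => hs (List.mem_of_mem_drop hx)
      have hstep := pvRep_strip l1 (s.drop m) c h1 h2
      by_cases hc : (s.drop m).head? = some c
      · have hlt : m < pvVrun s := by
          rcases lt_or_eq_of_le hm with h | h
          · exact h
          · exfalso
            have hdrop : s.drop m = s.dropWhile pvIsVow := by
              rw [h, pvVrun, pvDrop_run]
            rw [hdrop] at hc
            have hfalse := pvHead_dropWhile pvIsVow s c hc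
            have htrue := hL c (by simp)
            simp [htrue] at hfalse
        have hnext : PySem.Chars.replace (pvState2 l1 s m) ['=', c] ['=']
            = pvState2 l1 s (m+1) := by
          rw [pvState2, hstep, if_pos hc, pvState2, List.tail_drop]
        have hnum : pvNum s (c :: L) m = pvNum s L (m+1) := by rw [pvNum, if_pos hc]
        have := ih (fun c hc => hL c (List.mem_cons_of_mem _ hc)) (m+1) (Nat.succ_le_of_lt hlt)
        exact ⟨by rw [List.foldl_cons, hnext, hnum]; exact this.1, by rw [hnum]; exact this.2⟩
      · have hnext : PySem.Chars.replace (pvState2 l1 s m) ['=', c] ['=']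
            = pvState2 l1 s m := by rw [pvState2, hstep, if_neg hc]
        have hnum : pvNum s (c :: L) m = pvNum s L m := by rw [pvNum, if_neg hc]
        have := ih (fun c hc => hL c (List.mem_cons_of_mem _ hc)) m hm
        exact ⟨by rw [List.foldl_cons, hnext, hnum]; exact this.1, by rw [hnum]; exact this.2⟩

theorem pvVowList : ∀ c : Char, pvIsVow c = true ↔ c ∈ ['a','i','u'] := by
  intro c
  simp only [pvIsVow, Bool.or_eq_true, decide_eq_true_eq, List.mem_cons, List.not_mem_nil, or_false]
  tauto

theorem pvState2_inj (l1 s : List Char) (n m : Nat)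
    (hn : n ≤ s.length) (hm : m ≤ s.length) (h : pvState2 l1 s n = pvState2 l1 s m) : n = m := by
  have := congrArg List.length h
  simp [pvState2] at this
  omega

theorem pvLoop2_reach (l1 s : List Char) (h1 : '=' ∉ l1) (hs : '=' ∉ s) :
    ∀ (f : Nat) (m : Nat) (old : List Char), m ≤ pvVrun s → pvVrun s - m + 2 ≤ f →
    old ≠ pvState2 l1 s m →
    pvStripLoop f old (pvState2 l1 s m) = pvState2 l1 s (pvVrun s) := by
  intro f
  induction f with
  | zero => intro m old _ hf _; omega
  | succ f ih =>
      intro m old hm hf hold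
      rw [pvStripLoop, if_neg hold]
      have hpass := pvPass2_fold l1 s h1 hs ['a','i','u']
        (fun c hc => (pvVowList c).mpr hc) m hm
      have hps : pvStripPass (pvState2 l1 s m) = pvState2 l1 s (pvNum s ['a','i','u'] m) := by
        rw [pvStripPass]; exact hpass.1
      rw [hps]
      by_cases hcase : m = pvVrun s
      · have heq : pvNum s ['a','i','u'] m = m := by
          have := pvNum_le s ['a','i','u'] m
          omega
        rw [heq, ← hcase]
        cases f with
        | zero => omega
        | succ f2 => rw [pvStripLoop, if_pos rfl, hcase]
      · have hlt : m < pvVrun s := lt_of_le_of_ne hm hcase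
        obtain ⟨c0, hhead, hc0⟩ := pvTakeWhile_get pvIsVow s m hlt
        have hprog : m < pvNum s ['a','i','u'] m :=
          pvNum_progress s _ m c0 hhead ((pvVowList c0).mp hc0)
        apply ih (pvNum s ['a','i','u'] m) (pvState2 l1 s m) hpass.2 (by omega)
        intro he
        have := pvState2_inj l1 s m _ (le_trans hm (pvVrun_le s))
          (le_trans hpass.2 (pvVrun_le s)) he
        omega

-- ---- assembly ----
theorem pvMain (F : Nat) (cs : List Char) (hcs : '=' ∉ cs)
    (hF1 : pvRun cs + 2 ≤ F) (hF2 : pvVrun (cs.dropWhile pvIsCons) + 2 ≤ F) :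
    PySem.Chars.replace
        (pvStripLoop F []
          (PySem.Chars.replace (pvShiftLoop F [] ('=' :: cs)) ['='] ['a', '=']))
        ['='] []
      = cs.takeWhile pvIsCons ++ 'a' :: (cs.dropWhile pvIsCons).dropWhile pvIsVow := by
  have h0 : ('=' :: cs) = pvState1 cs 0 := by simp [pvState1]
  have hL1 : pvShiftLoop F [] ('=' :: cs) = pvState1 cs (pvRun cs) := by
    rw [h0]
    exact pvLoop1_reach cs hcs F 0 [] (by omega) (by omega)
      (fun e => pvState1_ne_nil cs 0 e.symm)
  rw [hL1]
  have htk : '=' ∉ cs.takeWhile pvIsCons := fun hx => hcs ((List.takeWhile_sublist _).subset hx)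
  have hdw : '=' ∉ cs.dropWhile pvIsCons := fun hx => hcs ((List.dropWhile_sublist _).subset hx)
  have hS1 : pvState1 cs (pvRun cs) = cs.takeWhile pvIsCons ++ '=' :: cs.dropWhile pvIsCons := by
    rw [pvState1, pvRun, pvTake_run, pvDrop_run]
  rw [hS1, pvRep_ins _ _ htk hdw]
  have hl1 : '=' ∉ cs.takeWhile pvIsCons ++ ['a'] := by
    intro hx
    rcases List.mem_append.mp hx with h | h
    · exact htk h
    · simp at h
  have h20 : (cs.takeWhile pvIsCons ++ ['a']) ++ '=' :: cs.dropWhile pvIsCons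
      = pvState2 (cs.takeWhile pvIsCons ++ ['a']) (cs.dropWhile pvIsCons) 0 := by
    simp [pvState2]
  rw [h20]
  have hL2 : pvStripLoop F [] (pvState2 (cs.takeWhile pvIsCons ++ ['a']) (cs.dropWhile pvIsCons) 0)
      = pvState2 (cs.takeWhile pvIsCons ++ ['a']) (cs.dropWhile pvIsCons)
          (pvVrun (cs.dropWhile pvIsCons)) := by
    exact pvLoop2_reach _ _ hl1 hdw F 0 [] (by omega) (by omega)
      (by intro e; simp [pvState2] at e)
  rw [hL2]
  have hds : '=' ∉ (cs.dropWhile pvIsCons).drop (pvVrun (cs.dropWhile pvIsCons)) :=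
    fun hx => hdw (List.mem_of_mem_drop hx)
  rw [pvState2, pvRep_del _ _ hl1 hds, pvVrun, pvDrop_run]
  simp

-- ===== VERDICT (by name: the statement is the Claim_ definition above) =====
theorem VSimp_spec : Claim_equal_VSimp := by
  intro word _ hpre
  unfold Spec_VSimp
  have hcs : '=' ∉ word.toList := hpre
  have hb : word.toList.length + 3 ≤ (('=' :: word.toList).length + 2) * (('=' :: word.toList).length + 2) := by
    simp only [List.length_cons]
    have := Nat.le_mul_of_pos_right (word.toList.length + 1 + 2)
      (show 0 < word.toList.length + 1 + 2 by omega)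
    omega
  have hrun := pvRun_le word.toList
  have hvrun := pvVrun_le (word.toList.dropWhile pvIsCons)
  have hslen : (word.toList.dropWhile pvIsCons).length ≤ word.toList.length :=
    (List.dropWhile_sublist _).length_le
  have hmain := pvMain ((('=' :: word.toList).length + 2) * (('=' :: word.toList).length + 2))
    word.toList hcs (by omega) (by omega)
  simp only [VSimp, VSimp_alt]
  rw [hmain]
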